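-- pv_equiv track=rewrite | github.com/verynicetomato/Python | Programmers_Python/LEVEL0/A 강조하기.py | solution
-- ===== SOURCE A (Python) =====
-- def solution(myString):
--     answer = ''
--     for i in myString:
--         if i == "a" or i == "A":
--             answer += i.upper()
--         else:
--             answer += i.lower()
--     return answer
-- ===== SOURCE B (Python) =====
-- def solution(myString):
--     return myString.lower().replace('a', 'A')
-- ===== Notes on version B (the rewrite author's own statement) =====
-- stated objective: faster
-- what changed: Replaced the per-character loop with branching and quadratic string concatenation by two linear whole-string passes: lowercase everything, then replace each lowercase letter a with its uppercase form.
import Mathlib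
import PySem

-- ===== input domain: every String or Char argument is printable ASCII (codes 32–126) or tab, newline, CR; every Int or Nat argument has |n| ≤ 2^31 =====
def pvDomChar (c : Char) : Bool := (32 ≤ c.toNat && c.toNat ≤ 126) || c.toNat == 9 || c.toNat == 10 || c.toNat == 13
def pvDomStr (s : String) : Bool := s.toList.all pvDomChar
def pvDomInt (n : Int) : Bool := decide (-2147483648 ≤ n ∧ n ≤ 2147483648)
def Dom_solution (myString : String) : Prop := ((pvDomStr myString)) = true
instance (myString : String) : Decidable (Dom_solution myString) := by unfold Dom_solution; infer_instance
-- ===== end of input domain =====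

-- B replaces A's per-character loop (branch + string concatenation) by two whole-string passes: lower() then replace('a','A'); idiomatic, same result.

-- ===== PORT A =====
-- per-character loop: answer += i.upper() if i in {'a','A'} else i.lower()
def solution (myString : String) : String :=
  myString.toList.foldl
    (fun (answer : String) (i : Char) =>
      if i == 'a' || i == 'A' then answer ++ PySem.Str.upper (String.ofList [i])
      else answer ++ PySem.Str.lower (String.ofList [i]))
    ""

-- ===== PORT B =====
-- myString.lower().replace('a', 'A')
def solution_alt (myString : String) : String :=
  PySem.Str.replace (PySem.Str.lower myString) "a" "A"

-- ===== PRECONDITION & SPEC =====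
def Spec_solution (myString : String) (out : String) : Prop := out = solution_alt myString
instance (myString : String) (out : String) : Decidable (Spec_solution myString out) := by unfold Spec_solution; infer_instance

-- ===== CLAIM (what is proved, stated in full; the proofs are below) =====
def Claim_equal_solution : Prop := ∀ (myString : String), Dom_solution myString → Spec_solution myString (solution myString)

-- ===== LEMMAS AND PROOFS =====

-- the per-character value A appends
def pvStep (c : Char) : Char :=
  if c = 'a' ∨ c = 'A' then 'A' else PySem.Chars.lowerChar c

lemma lowerChar_eq_a_iff (c : Char) :
    PySem.Chars.lowerChar c = 'a' ↔ (c = 'a' ∨ c = 'A') := by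
  unfold PySem.Chars.lowerChar PySem.Chars.isupper
  constructor
  · intro h
    split_ifs at h with hu
    · simp only [Bool.and_eq_true, decide_eq_true_eq] at hu
      rw [Char.le_def] at hu
      have h1 : 65 ≤ c.toNat := UInt32.le_iff_toNat_le.mp hu.1
      have h2 : c.toNat ≤ 90 := UInt32.le_iff_toNat_le.mp hu.2
      have hval : (c.toNat + 32).isValidChar := Or.inl (by omega)
      have hn : c.toNat + 32 = 97 := by
        have := congrArg Char.toNat h
        rw [Char.toNat_ofNat, if_pos hval] at this
        simpa using this
      right
      apply Char.ext
      apply UInt32.toNat_inj.mp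
      show c.toNat = (65 : Nat)
      omega
    · exact Or.inl h
  · rintro (rfl | rfl) <;> decide

lemma go_single (fuel : Nat) :
    ∀ (l acc : List Char), l.length ≤ fuel →
      PySem.Chars.replace.go ['a'] ['A'] fuel l acc =
        acc.reverse ++ l.map (fun c => if c = 'a' then 'A' else c) := by
  induction fuel with
  | zero =>
    intro l acc h
    have : l = [] := List.eq_nil_of_length_eq_zero (Nat.le_zero.mp h)
    subst this
    simp [PySem.Chars.replace.go]
  | succ n ih =>
    intro l acc h
    cases l with
    | nil => simp [PySem.Chars.replace.go]
    | cons c t =>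
      simp only [PySem.Chars.replace.go]
      by_cases hc : c = 'a'
      · subst hc
        have hp : (['a'] : List Char).isPrefixOf ('a' :: t) = true := by
          simp [List.isPrefixOf]
        rw [if_pos hp]
        have := ih t ('A' :: acc) (by simpa using Nat.le_of_succ_le_succ h)
        simpa [List.map] using this
      · have hp : (['a'] : List Char).isPrefixOf (c :: t) = false := by
          simp [List.isPrefixOf, Ne.symm hc]
        rw [if_neg (by simp [hp])]
        have := ih t (c :: acc) (by simpa using Nat.le_of_succ_le_succ h)
        simpa [List.map, hc] using this

lemma alt_toList (s : String) :
    (solution_alt s).toList = s.toList.map pvStep := by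
  unfold solution_alt
  rw [PySem.Str.toList_replace, PySem.Str.toList_lower]
  have htA : ("A" : String).toList = ['A'] := by decide
  have hta : ("a" : String).toList = ['a'] := by decide
  rw [htA, hta]
  unfold PySem.Chars.replace
  rw [if_neg (by simp)]
  rw [go_single _ _ _ (by simp [PySem.Chars.lower])]
  simp only [List.reverse_nil, List.nil_append, PySem.Chars.lower, List.map_map]
  apply List.map_congr_left
  intro c _
  simp only [Function.comp_apply, pvStep]
  by_cases h : PySem.Chars.lowerChar c = 'a'
  · rw [if_pos h, if_pos ((lowerChar_eq_a_iff c).mp h)]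
  · rw [if_neg h, if_neg (fun hc => h ((lowerChar_eq_a_iff c).mpr hc))]

lemma step_toList (c : Char) :
    (if c = 'a' ∨ c = 'A' then PySem.Str.upper (String.ofList [c])
     else PySem.Str.lower (String.ofList [c])).toList = [pvStep c] := by
  unfold pvStep
  by_cases h : c = 'a' ∨ c = 'A'
  · rw [if_pos h, if_pos h]
    rcases h with rfl | rfl <;> decide
  · rw [if_neg h, if_neg h]
    simp [PySem.Str.lower, PySem.Chars.lower]

lemma a_loop (cs : List Char) :
    ∀ (acc : String),
      (cs.foldl
        (fun (answer : String) (i : Char) =>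
          if i == 'a' || i == 'A' then answer ++ PySem.Str.upper (String.ofList [i])
          else answer ++ PySem.Str.lower (String.ofList [i])) acc).toList =
      acc.toList ++ cs.map pvStep := by
  induction cs with
  | nil => intro acc; simp
  | cons c t ih =>
    intro acc
    simp only [List.foldl_cons]
    rw [ih]
    rw [show (if (c == 'a' || c == 'A') = true then acc ++ PySem.Str.upper (String.ofList [c])
          else acc ++ PySem.Str.lower (String.ofList [c]))
        = acc ++ (if (c == 'a' || c == 'A') = true then PySem.Str.upper (String.ofList [c])
          else PySem.Str.lower (String.ofList [c])) from by split_ifs <;> rfl]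
    simp [step_toList c]

-- ===== VERDICT (by name: the statement is the Claim_ definition above) =====
theorem solution_spec : Claim_equal_solution := by
  intro s _
  unfold Spec_solution solution
  have h1 := a_loop s.toList ""
  have h2 := alt_toList s
  apply String.ext  -- equality via toList
  rw [h1, h2]
  simp
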